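-- pv_equiv track=rewrite | github.com/gaiin-platform/amplify-genai-backend | amplify-lambda-admin/service/user_services.py | user_in_group
-- ===== SOURCE A (Python) =====
-- def user_in_group(group_name, current_user, all_amplify_groups, visited):
--     """
--     Checks if `current_user` is in `group_name` directly or through nested groups.
--     Avoids infinite loops using the `visited` set.
--     """
--     # If the group does not exist in the map, return False
--     # If we have already visited this group, return False to avoid cycles
--     if group_name not in all_amplify_groups or group_name in visited:
--         return False
--
--     visited.add(group_name)
--
--     cur_group = all_amplify_groups[group_name]
--
--     # Check direct membership
--     members = cur_group.get("members", [])
--     if current_user in members: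
--         return True
--
--     # Check include groups
--     for include_group_name in cur_group.get("includeFromOtherGroups", []):
--         if user_in_group(include_group_name, current_user, all_amplify_groups, visited):
--             return True
--
--     # If user not found here or in any included groups
--     return False
-- ===== SOURCE B (Python) =====
-- def user_in_group(group_name, current_user, all_amplify_groups, visited):
--     """
--     Iterative DFS with an explicit stack instead of recursion.
--     Mutates `visited` the same way A does; same return value.
--     """
--     stack = [group_name]
--     while stack:
--         node = stack.pop()
--         if node not in all_amplify_groups or node in visited:
--             continue
--         visited.add(node)
--         cur_group = all_amplify_groups[node]
--         if current_user in cur_group.get("members", []):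
--             return True
--         stack.extend(reversed(cur_group.get("includeFromOtherGroups", [])))
--     return False
-- ===== Notes on version B (the rewrite author's own statement) =====
-- stated objective: alternative
-- what changed: The recursive DFS over nested groups is replaced by an iterative loop over an explicit stack (children pushed in reversed order so the preorder, visited-set mutation and early exit are identical).
import Mathlib
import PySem

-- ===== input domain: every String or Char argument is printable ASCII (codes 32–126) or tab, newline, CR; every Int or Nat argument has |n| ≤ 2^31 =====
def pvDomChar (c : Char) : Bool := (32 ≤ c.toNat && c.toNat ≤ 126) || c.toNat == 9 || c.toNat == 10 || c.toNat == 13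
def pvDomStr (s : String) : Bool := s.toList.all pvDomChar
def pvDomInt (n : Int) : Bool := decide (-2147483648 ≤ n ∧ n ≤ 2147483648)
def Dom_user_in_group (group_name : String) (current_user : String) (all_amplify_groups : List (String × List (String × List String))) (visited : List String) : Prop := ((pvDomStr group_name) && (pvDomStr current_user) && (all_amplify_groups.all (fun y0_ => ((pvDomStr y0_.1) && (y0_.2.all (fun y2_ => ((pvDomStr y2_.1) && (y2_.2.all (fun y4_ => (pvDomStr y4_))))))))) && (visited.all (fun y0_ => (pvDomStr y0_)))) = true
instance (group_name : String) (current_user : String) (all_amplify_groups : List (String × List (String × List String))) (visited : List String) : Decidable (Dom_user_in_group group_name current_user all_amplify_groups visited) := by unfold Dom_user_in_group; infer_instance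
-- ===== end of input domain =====

-- B replaces A's recursive DFS by an iterative loop over an explicit stack (same preorder,
-- same early exit); equivalence is about the RETURN value — both Pythons also mutate the
-- `visited` set in place in the same way, which the Lean ports model by threading the set.

-- ===== PORT A =====
-- A is recursive; the Nat argument is a pure fuel guard making the recursion structurally
-- total (all_amplify_groups.length + 1 bounds the recursion depth, since every call that
-- proceeds past the guard adds a fresh key of the dict to `visited`).
mutual
def goUG (all : List (String × List (String × List String))) (user : String) :
    Nat → String → PySem.Set String → Bool × PySem.Set String
  | 0, _, v => (false, v)
  | f+1, g, v =>
    match (PySem.Dict.mk all).get? g with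
    | none => (false, v)                              -- group_name not in all_amplify_groups
    | some cur =>
      if v.contains g then (false, v)                 -- group_name in visited
      else
        let v' := PySem.Set.add v g                   -- visited.add(group_name)
        if (PySem.Dict.getD (PySem.Dict.mk cur) "members" []).contains user then (true, v')
        else goListUG all user f (PySem.Dict.getD (PySem.Dict.mk cur) "includeFromOtherGroups" []) v'
termination_by f _ _ => (f, 0)

def goListUG (all : List (String × List (String × List String))) (user : String) :
    Nat → List String → PySem.Set String → Bool × PySem.Set String
  | _, [], v => (false, v)
  | f, g :: rest, v =>
    let p := goUG all user f g v
    if p.1 then (true, p.2) else goListUG all user f rest p.2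
termination_by f l _ => (f, l.length + 1)
end

def user_in_group (group_name : String) (current_user : String) (all_amplify_groups : List (String × List (String × List String))) (visited : List String) : Bool :=
  (goUG all_amplify_groups current_user (all_amplify_groups.length + 1) group_name visited).1

-- ===== PORT B =====
-- number of dict keys not yet visited (termination measure component for the stack loop)
def nuUG (all : List (String × List (String × List String))) (v : PySem.Set String) : Nat :=
  ((all.map Prod.fst).filter (fun k => !(v.contains k))).length

-- total number of include entries over all dict entries (bounds one push of the stack)
def totIncUG (all : List (String × List (String × List String))) : Nat :=
  (all.map (fun e => (PySem.Dict.getD (PySem.Dict.mk e.2) "includeFromOtherGroups" []).length)).sum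

lemma len_filter_le_of_imp {α : Type} (l : List α) (p q : α → Bool)
    (h : ∀ x ∈ l, p x = true → q x = true) :
    (l.filter p).length ≤ (l.filter q).length := by
  induction l with
  | nil => simp
  | cons a l ih =>
    have ih' := ih (fun x hx => h x (List.mem_cons_of_mem _ hx))
    by_cases hp : p a = true
    · rw [List.filter_cons_of_pos hp, List.filter_cons_of_pos (h a List.mem_cons_self hp)]
      simpa using ih'
    · rw [List.filter_cons_of_neg hp]
      by_cases hq : q a = true
      · rw [List.filter_cons_of_pos hq]; exact Nat.le_succ_of_le ih'
      · rw [List.filter_cons_of_neg hq]; exact ih'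

lemma len_filter_lt {α : Type} (l : List α) (p q : α → Bool)
    (h : ∀ x ∈ l, p x = true → q x = true) (g : α) (hg : g ∈ l)
    (hp : p g = false) (hq : q g = true) :
    (l.filter p).length < (l.filter q).length := by
  induction l with
  | nil => cases hg
  | cons a l ih =>
    have hsub : ∀ x ∈ l, p x = true → q x = true := fun x hx => h x (List.mem_cons_of_mem _ hx)
    rcases List.mem_cons.mp hg with rfl | hgl
    · rw [List.filter_cons_of_neg (by simp [hp]), List.filter_cons_of_pos hq]
      exact Nat.lt_succ_of_le (len_filter_le_of_imp l p q hsub)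
    · by_cases hpa : p a = true
      · rw [List.filter_cons_of_pos hpa, List.filter_cons_of_pos (h a List.mem_cons_self hpa),
          List.length_cons, List.length_cons]
        exact Nat.succ_lt_succ (ih hsub hgl)
      · rw [List.filter_cons_of_neg hpa]
        by_cases hqa : q a = true
        · rw [List.filter_cons_of_pos hqa]; exact Nat.lt_succ_of_lt (ih hsub hgl)
        · rw [List.filter_cons_of_neg hqa]; exact ih hsub hgl

lemma key_mem_of_get? (all : List (String × List (String × List String)))
    (g : String) (cur : List (String × List String))
    (h : (PySem.Dict.mk all).get? g = some cur) : g ∈ all.map Prod.fst := by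
  simp only [PySem.Dict.get?, Option.map_eq_some_iff] at h
  obtain ⟨x, hx, -⟩ := h
  have hbeq := List.find?_some hx
  have hx' := List.mem_of_find?_eq_some hx
  simp only [beq_iff_eq] at hbeq
  subst hbeq
  exact List.mem_map_of_mem hx'

lemma nuUG_add_lt (all : List (String × List (String × List String))) (v : PySem.Set String)
    (g : String) (cur : List (String × List String))
    (h : (PySem.Dict.mk all).get? g = some cur) (hc : ¬ v.contains g = true) :
    nuUG all (PySem.Set.add v g) < nuUG all v := by
  have hgv : g ∉ v := fun hm => hc (List.contains_iff_mem.mpr hm)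
  apply len_filter_lt (all.map Prod.fst) _ _ _ g (key_mem_of_get? all g cur h)
  · simp [PySem.Set.contains, PySem.Set.mem_add]
  · simpa [PySem.Set.contains] using hgv
  · intro x _ hx
    simp only [PySem.Set.contains, Bool.not_eq_eq_eq_not, Bool.not_true,
      ← Bool.not_eq_true, List.contains_iff_mem, PySem.Set.mem_add] at hx ⊢
    tauto

lemma incLen_le_tot (all : List (String × List (String × List String)))
    (g : String) (cur : List (String × List String))
    (h : (PySem.Dict.mk all).get? g = some cur) :
    (PySem.Dict.getD (PySem.Dict.mk cur) "includeFromOtherGroups" []).length ≤ totIncUG all := by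
  simp only [PySem.Dict.get?, Option.map_eq_some_iff] at h
  obtain ⟨x, hx, hx2⟩ := h
  have hx' := List.mem_of_find?_eq_some hx
  have hmem : (PySem.Dict.getD (PySem.Dict.mk cur) "includeFromOtherGroups" []).length ∈
      (all.map (fun e => (PySem.Dict.getD (PySem.Dict.mk e.2) "includeFromOtherGroups" []).length)) := by
    subst hx2
    exact List.mem_map_of_mem hx'
  exact List.single_le_sum (by intro y _; exact Nat.zero_le y) _ hmem

lemma dec_arith (a b M L r : Nat) (h1 : a < b) (h2 : L ≤ M) :
    a * (M + 2) + (L + r) < b * (M + 2) + (r + 1) := by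
  have h3 : (a + 1) * (M + 2) ≤ b * (M + 2) := Nat.mul_le_mul_right _ h1
  rw [Nat.add_mul, Nat.one_mul] at h3
  omega

-- B: iterative DFS; the stack is held top-first, so pushing the reversed include list
-- (Python: stack.extend(reversed(...)); stack.pop()) is `includes ++ rest` here.
def loopUG (all : List (String × List (String × List String))) (user : String) :
    List String → PySem.Set String → Bool × PySem.Set String
  | [], v => (false, v)
  | g :: rest, v =>
    match h : (PySem.Dict.mk all).get? g with
    | none => loopUG all user rest v
    | some cur =>
      if hc : v.contains g then loopUG all user rest v
      else
        let v' := PySem.Set.add v g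
        if (PySem.Dict.getD (PySem.Dict.mk cur) "members" []).contains user then (true, v')
        else loopUG all user (PySem.Dict.getD (PySem.Dict.mk cur) "includeFromOtherGroups" [] ++ rest) v'
termination_by l v => nuUG all v * (totIncUG all + 2) + l.length
decreasing_by
  all_goals simp only [List.length_append, List.length_cons]
  · omega
  · omega
  · exact dec_arith _ _ _ _ _ (nuUG_add_lt all v g cur h hc) (incLen_le_tot all g cur h)

def user_in_group_alt (group_name : String) (current_user : String) (all_amplify_groups : List (String × List (String × List String))) (visited : List String) : Bool :=
  (loopUG all_amplify_groups current_user [group_name] visited).1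

-- ===== PRECONDITION & SPEC =====
def Spec_user_in_group (group_name : String) (current_user : String) (all_amplify_groups : List (String × List (String × List String))) (visited : List String) (out : Bool) : Prop := out = user_in_group_alt group_name current_user all_amplify_groups visited
instance (group_name : String) (current_user : String) (all_amplify_groups : List (String × List (String × List String))) (visited : List String) (out : Bool) : Decidable (Spec_user_in_group group_name current_user all_amplify_groups visited out) := by unfold Spec_user_in_group; infer_instance

-- ===== CLAIM (what is proved, stated in full; the proofs are below) =====
def Claim_equal_user_in_group : Prop := ∀ (group_name : String) (current_user : String) (all_amplify_groups : List (String × List (String × List String))) (visited : List String), Dom_user_in_group group_name current_user all_amplify_groups visited → Spec_user_in_group group_name current_user all_amplify_groups visited (user_in_group group_name current_user all_amplify_groups visited)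

-- ===== LEMMAS AND PROOFS =====

-- `visited` only grows along A's recursion (both branches together, by strong induction on fuel).
lemma goUG_mono_pair (all : List (String × List (String × List String))) (user : String) :
    ∀ f : Nat,
      (∀ (g : String) (v : PySem.Set String) (x : String),
        x ∈ v → x ∈ (goUG all user f g v).2) ∧
      (∀ (l : List String) (v : PySem.Set String) (x : String),
        x ∈ v → x ∈ (goListUG all user f l v).2) := by
  intro f
  induction f using Nat.strong_induction_on with
  | _ f IH =>
  have hG : ∀ (g : String) (v : PySem.Set String) (x : String),
      x ∈ v → x ∈ (goUG all user f g v).2 := by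
    intro g v x hx
    match f with
    | 0 => simpa [goUG] using hx
    | f'+1 =>
      rw [goUG]
      cases hd : (PySem.Dict.mk all).get? g with
      | none => exact hx
      | some cur =>
        by_cases hgv : g ∈ v
        · simpa [hgv] using hx
        · have hx' : x ∈ PySem.Set.add v g := (PySem.Set.mem_add v g x).mpr (Or.inl hx)
          by_cases hm : user ∈ PySem.Dict.getD (PySem.Dict.mk cur) "members" []
          · simpa [hgv, hm] using hx'
          · simpa [hgv, hm] using
              (IH f' (by omega)).2 (PySem.Dict.getD (PySem.Dict.mk cur) "includeFromOtherGroups" [])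
                (PySem.Set.add v g) x hx'
  have hL : ∀ (l : List String) (v : PySem.Set String) (x : String),
      x ∈ v → x ∈ (goListUG all user f l v).2 := by
    intro l
    induction l with
    | nil =>
      intro v x hx
      cases f <;> simpa [goListUG] using hx
    | cons g l' ihl =>
      intro v x hx
      rw [goListUG]
      have h1 := hG g v x hx
      by_cases hp : (goUG all user f g v).1 = true
      · simpa [hp] using h1
      · simpa [hp] using ihl (goUG all user f g v).2 x h1
  exact ⟨hG, hL⟩

lemma nuUG_mono (all : List (String × List (String × List String))) (v w : PySem.Set String)
    (h : ∀ x, x ∈ v → x ∈ w) : nuUG all w ≤ nuUG all v := by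
  apply len_filter_le_of_imp
  intro x _ hx
  simp only [PySem.Set.contains, Bool.not_eq_eq_eq_not, Bool.not_true,
    ← Bool.not_eq_true, List.contains_iff_mem] at hx ⊢
  exact fun hv => hx (h x hv)

-- Core bridge: the stack loop simulates A's recursion (with sufficient fuel), one claim for
-- a single stack head, one for a block of the stack.
lemma bridgeUG (all : List (String × List (String × List String))) (user : String) :
    ∀ f : Nat,
      (∀ (l rest : List String) (v : PySem.Set String), nuUG all v + 1 ≤ f →
        loopUG all user (l ++ rest) v =
          (let p := goListUG all user f l v;
           if p.1 then (true, p.2) else loopUG all user rest p.2)) ∧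
      (∀ (g : String) (v : PySem.Set String) (rest : List String), nuUG all v ≤ f →
        loopUG all user (g :: rest) v =
          (let p := goUG all user (f+1) g v;
           if p.1 then (true, p.2) else loopUG all user rest p.2)) := by
  intro f
  induction f using Nat.strong_induction_on with
  | _ f IH =>
  have hL : ∀ (l rest : List String) (v : PySem.Set String), nuUG all v + 1 ≤ f →
      loopUG all user (l ++ rest) v =
        (let p := goListUG all user f l v;
         if p.1 then (true, p.2) else loopUG all user rest p.2) := by
    intro l
    induction l with
    | nil =>
      intro rest v _
      cases f <;> simp [goListUG]
    | cons g l' ihl =>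
      intro rest v h
      obtain ⟨f', rfl⟩ : ∃ f', f = f' + 1 := ⟨f - 1, by omega⟩
      have hG' := (IH f' (by omega)).2 g v (l' ++ rest) (by omega)
      rw [List.cons_append, hG']
      rw [goListUG]
      simp only
      by_cases hp : (goUG all user (f'+1) g v).1 = true
      · simp [hp]
      · have hnu : nuUG all (goUG all user (f'+1) g v).2 + 1 ≤ f' + 1 := by
          have := nuUG_mono all v (goUG all user (f'+1) g v).2
            (fun x hx => (goUG_mono_pair all user (f'+1)).1 g v x hx)
          omega
        simp only [hp, if_false, Bool.false_eq_true]
        exact ihl rest (goUG all user (f'+1) g v).2 hnu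
  have hG : ∀ (g : String) (v : PySem.Set String) (rest : List String), nuUG all v ≤ f →
      loopUG all user (g :: rest) v =
        (let p := goUG all user (f+1) g v;
         if p.1 then (true, p.2) else loopUG all user rest p.2) := by
    intro g v rest h
    rw [loopUG, goUG]
    cases hd : (PySem.Dict.mk all).get? g with
    | none => simp
    | some cur =>
      by_cases hgv : g ∈ v
      · simp [hgv]
      · by_cases hm : user ∈ PySem.Dict.getD (PySem.Dict.mk cur) "members" []
        · simp [hgv, hm]
        · have hgv' : ¬ v.contains g = true := fun hcc => hgv (List.contains_iff_mem.mp hcc)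
          have hnu : nuUG all (PySem.Set.add v g) + 1 ≤ f :=
            Nat.succ_le_of_lt (lt_of_lt_of_le (nuUG_add_lt all v g cur hd hgv') h)
          have hLr := hL (PySem.Dict.getD (PySem.Dict.mk cur) "includeFromOtherGroups" []) rest
            (PySem.Set.add v g) hnu
          simpa [hgv, hm] using hLr
  exact ⟨hL, hG⟩

-- ===== VERDICT (by name: the statement is the Claim_ definition above) =====
theorem user_in_group_spec : Claim_equal_user_in_group := by
  intro g u all v _
  unfold Spec_user_in_group user_in_group user_in_group_alt
  have hnu : nuUG all v ≤ all.length := by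
    unfold nuUG
    calc ((all.map Prod.fst).filter _).length ≤ (all.map Prod.fst).length :=
          List.length_filter_le _ _
      _ = all.length := List.length_map ..
  have hG := (bridgeUG all u all.length).2 g v [] hnu
  rw [show ([g] : List String) = g :: [] from rfl, hG]
  by_cases hp : (goUG all u (all.length + 1) g v).1 = true
  · simp [hp]
  · simp [hp, loopUG]
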